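-- pv_equiv track=rewrite | github.com/MenHimChan/MoveTrackSys_TIcup_2023 | OPENMV4/problem13.py | get_more
-- ===== SOURCE A (Python) =====
-- def get_more(cur):
--     a = cur[:]
--     res = a[:]
--     for i in range(4):
--         length = (len(a))
--         for j in range(length - 1):
--             num = [0,0]
--             for k in range(2):
--                 num[k] = (res[j][k] + res[j + 1][k]) // 2
--             a.insert(2 * j + 1, num)
--         res = a[:]
--     return res
-- ===== SOURCE B (Python) =====
-- def get_more(cur):
--     def subdivide(p, q, depth):
--         if depth == 0:
--             return []
--         mid = [(p[0] + q[0]) // 2, (p[1] + q[1]) // 2]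
--         return subdivide(p, mid, depth - 1) + [mid] + subdivide(mid, q, depth - 1)
--
--     if not cur:
--         return []
--     out = [cur[0]]
--     for p, q in zip(cur, cur[1:]):
--         out += subdivide(p, q, 4) + [q]
--     return out
-- ===== Notes on version B (the rewrite author's own statement) =====
-- stated objective: alternative
-- what changed: Replaced the four flat in-place midpoint-insertion sweeps (list.insert at computed indices, per-coordinate k-loop) by a recursive binary subdivision of each adjacent pair of points, concatenating per-segment results in one pass.
-- outside the precondition, e.g. on get_more([[1], [2, 3]]): A raises IndexError, B raises IndexError
import Mathlib
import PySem

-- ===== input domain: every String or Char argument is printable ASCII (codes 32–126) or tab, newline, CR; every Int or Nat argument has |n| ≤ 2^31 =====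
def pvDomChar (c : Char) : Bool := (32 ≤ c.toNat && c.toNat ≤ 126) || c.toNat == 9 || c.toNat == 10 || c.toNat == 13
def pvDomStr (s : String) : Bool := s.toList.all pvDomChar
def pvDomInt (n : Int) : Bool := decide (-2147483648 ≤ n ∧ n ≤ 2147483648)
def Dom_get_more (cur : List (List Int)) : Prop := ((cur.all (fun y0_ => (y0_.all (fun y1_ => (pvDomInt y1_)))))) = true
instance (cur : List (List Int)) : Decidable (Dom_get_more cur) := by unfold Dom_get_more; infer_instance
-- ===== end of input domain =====

-- B replaces the four flat midpoint-insertion sweeps by a recursive binary subdivision of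
-- each adjacent pair (objective: alternative decomposition, same output, same cost class).

-- ===== PORT A =====
-- literal transliteration of A: state (a, res); 4 rounds; inner loop inserts the
-- floor-midpoint of res[j], res[j+1] at position 2*j+1; num built by the k-loop.
-- res[j][k] is ported with pyGetD (defaults never used: indices are in range under Pre_).
def get_more (cur : List (List Int)) : List (List Int) :=
  let a := cur
  let res := a
  let st := (PySem.List.pyRange 0 4 1).foldl (fun st _i =>
      let a := st.1
      let res := st.2
      let length : Int := a.length
      let a := (PySem.List.pyRange 0 (length - 1) 1).foldl (fun a j =>
          let num : List Int := [0, 0]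
          let num := (PySem.List.pyRange 0 2 1).foldl (fun num k =>
              PySem.List.pySetD num k
                (PySem.Int.floordiv
                  (PySem.List.pyGetD (PySem.List.pyGetD res j []) k 0 +
                   PySem.List.pyGetD (PySem.List.pyGetD res (j + 1) []) k 0) 2)) num
          PySem.List.insert a (2 * j + 1) num) a
      (a, a)) (a, res)
  st.2

-- ===== PORT B =====
-- mid = [(p[0]+q[0])//2, (p[1]+q[1])//2]  (pyGetD: defaults never used under Pre_)
def pvMid (p q : List Int) : List Int :=
  [PySem.Int.floordiv (PySem.List.pyGetD p 0 0 + PySem.List.pyGetD q 0 0) 2,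
   PySem.Int.floordiv (PySem.List.pyGetD p 1 0 + PySem.List.pyGetD q 1 0) 2]

def pvSubdivide (p q : List Int) : Nat → List (List Int)
  | 0 => []
  | n + 1 =>
    let mid := pvMid p q
    pvSubdivide p mid n ++ [mid] ++ pvSubdivide mid q n

def get_more_alt (cur : List (List Int)) : List (List Int) :=
  match cur with
  | [] => []
  | c0 :: _ =>
    (cur.zip cur.tail).foldl
      (fun out pq => out ++ pvSubdivide pq.1 pq.2 4 ++ [pq.2]) [c0]

-- ===== PRECONDITION & SPEC =====
-- Pre_ excludes exactly the inputs on which Python A raises IndexError: two or more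
-- points with some point of length < 2 (res[j][k] for k in range(2)).
def Pre_get_more (cur : List (List Int)) : Prop :=
  cur.length ≤ 1 ∨ ∀ p ∈ cur, 2 ≤ p.length
instance (cur : List (List Int)) : Decidable (Pre_get_more cur) := by
  unfold Pre_get_more; infer_instance
def pvWitness_get_more : List (List Int) := [[0, 0], [2, 4]]
def Spec_get_more (cur : List (List Int)) (out : List (List Int)) : Prop := out = get_more_alt cur
instance (cur : List (List Int)) (out : List (List Int)) : Decidable (Spec_get_more cur out) := by unfold Spec_get_more; infer_instance

-- ===== CLAIM (what is proved, stated in full; the proofs are below) =====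
def Claim_equal_get_more : Prop := ∀ (cur : List (List Int)), Dom_get_more cur → Pre_get_more cur → Spec_get_more cur (get_more cur)

-- ===== LEMMAS AND PROOFS =====

-- one interleaving sweep: insert the floor-midpoint between every adjacent pair
def pvI : List (List Int) → List (List Int)
  | [] => []
  | [x] => [x]
  | x :: y :: t => x :: pvMid x y :: pvI (y :: t)

def pvIter : Nat → List (List Int) → List (List Int)
  | 0, l => l
  | n + 1, l => pvIter n (pvI l)

lemma pvI_cons_exists (x : List Int) (l : List (List Int)) :
    ∃ r, pvI (x :: l) = x :: r := by
  cases l with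
  | nil => exact ⟨[], rfl⟩
  | cons y t => exact ⟨pvMid x y :: pvI (y :: t), rfl⟩

lemma pvIter_nil (n : Nat) : pvIter n [] = [] := by
  induction n with
  | zero => rfl
  | succ n ih => simpa [pvIter, pvI] using ih

lemma pvIter_singleton (n : Nat) (x : List Int) : pvIter n [x] = [x] := by
  induction n with
  | zero => rfl
  | succ n ih => simpa [pvIter, pvI] using ih

-- pyGetD on a cons, positive index
lemma pyGetD_cons_pos {α : Type} (x : α) (l : List α) (i : Int) (h : 1 ≤ i) (d : α) :
    PySem.List.pyGetD (x :: l) i d = PySem.List.pyGetD l (i - 1) d := by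
  obtain ⟨n, rfl⟩ : ∃ n : Nat, i = (n : Int) + 1 :=
    ⟨(i - 1).toNat, by omega⟩
  have h1 : ((n : Int) + 1) = ((n + 1 : Nat) : Int) := by push_cast; ring
  rw [h1, PySem.List.pyGetD_natCast]
  simp [PySem.List.pyGetD_natCast]

-- Python list.insert on a cons, positive index (clamping preserved)
lemma insert_cons_pos {α : Type} (x : α) (l : List α) (i : Int) (h : 1 ≤ i) (v : α) :
    PySem.List.insert (x :: l) i v = x :: PySem.List.insert l (i - 1) v := by
  simp only [PySem.List.insert, PySem.List.sliceIndices]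
  split_ifs with h1 h2 h3 <;> try omega
  · simp only [List.length_cons]
    push_cast
    rw [show (min i ((l.length : Int) + 1)).toNat = (min (i - 1) (l.length : Int)).toNat + 1 from by
      omega]
    simp

-- the k-loop over range(2) builds exactly pvMid
lemma num_eq (p q : List Int) :
    (PySem.List.pyRange 0 2 1).foldl (fun num k =>
        PySem.List.pySetD num k
          (PySem.Int.floordiv (PySem.List.pyGetD p k 0 + PySem.List.pyGetD q k 0) 2))
      [0, 0] = pvMid p q := by
  rw [show PySem.List.pyRange 0 2 1 = [0, 1] from by decide]
  simp only [List.foldl_cons, List.foldl_nil]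
  simp [PySem.List.pySetD, PySem.List.pySet?, PySem.List.pyIdx?, pvMid]

-- the inner loop's step, abbreviated
def pvStep (res : List (List Int)) (a : List (List Int)) (j : Int) : List (List Int) :=
  PySem.List.insert a (2 * j + 1)
    ((PySem.List.pyRange 0 2 1).foldl (fun num k =>
        PySem.List.pySetD num k
          (PySem.Int.floordiv
            (PySem.List.pyGetD (PySem.List.pyGetD res j []) k 0 +
             PySem.List.pyGetD (PySem.List.pyGetD res (j + 1) []) k 0) 2)) [0, 0])

lemma pvStep_eq (res a : List (List Int)) (j : Int) :
    pvStep res a j =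
      PySem.List.insert a (2 * j + 1)
        (pvMid (PySem.List.pyGetD res j []) (PySem.List.pyGetD res (j + 1) [])) := by
  rw [pvStep, num_eq]

-- one step of the shifted fold
lemma pvStep_cons (x m : List Int) (res : List (List Int)) (b : List (List Int))
    (j : Int) (hj : 1 ≤ j) :
    pvStep (x :: res) (x :: m :: b) j = x :: m :: pvStep res b (j - 1) := by
  rw [pvStep_eq, pvStep_eq]
  rw [pyGetD_cons_pos x res j hj, pyGetD_cons_pos x res (j + 1) (by omega)]
  rw [insert_cons_pos x _ (2 * j + 1) (by omega), insert_cons_pos m _ (2 * j + 1 - 1) (by omega)]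
  have e1 : j + 1 - 1 = j - 1 + 1 := by ring
  have e2 : 2 * j + 1 - 1 - 1 = 2 * (j - 1) + 1 := by ring
  rw [e1, e2]

-- the fold over [lo, hi) with lo ≥ 1 on x :: m :: b shifts to a fold over [lo-1, hi-1) on b
lemma fold_shift (x m : List Int) (res : List (List Int)) :
    ∀ (n : Nat) (lo hi : Int), 1 ≤ lo → (hi - lo).toNat = n → ∀ b : List (List Int),
      (PySem.List.pyRange lo hi 1).foldl (pvStep (x :: res)) (x :: m :: b) =
        x :: m :: (PySem.List.pyRange (lo - 1) (hi - 1) 1).foldl (pvStep res) b := by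
  intro n
  induction n with
  | zero =>
    intro lo hi h1 h2 b
    rw [show PySem.List.pyRange lo hi 1 = [] from PySem.List.pyRange_one_eq_nil (by omega),
      show PySem.List.pyRange (lo - 1) (hi - 1) 1 = [] from PySem.List.pyRange_one_eq_nil (by omega)]
    rfl
  | succ n ih =>
    intro lo hi h1 h2 b
    rw [show PySem.List.pyRange lo hi 1 = lo :: PySem.List.pyRange (lo + 1) hi 1 from
        PySem.List.pyRange_one_cons (by omega),
      show PySem.List.pyRange (lo - 1) (hi - 1) 1 =
          (lo - 1) :: PySem.List.pyRange (lo - 1 + 1) (hi - 1) 1 from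
        PySem.List.pyRange_one_cons (by omega)]
    simp only [List.foldl_cons]
    rw [pvStep_cons x m res b lo h1]
    rw [show lo - 1 + 1 = lo from by ring]
    rw [ih (lo + 1) hi (by omega) (by omega) (pvStep res b (lo - 1))]
    rw [show lo + 1 - 1 = lo from by ring]

-- the whole inner loop is one interleaving sweep
lemma inner_main : ∀ res : List (List Int),
    (PySem.List.pyRange 0 ((res.length : Int) - 1) 1).foldl (pvStep res) res = pvI res := by
  intro res
  induction res with
  | nil =>
    rw [show PySem.List.pyRange 0 ((([] : List (List Int)).length : Int) - 1) 1 = [] from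
      PySem.List.pyRange_one_eq_nil (by norm_num)]
    rfl
  | cons x rest ih =>
    cases rest with
    | nil =>
      rw [show PySem.List.pyRange 0 ((([x] : List (List Int)).length : Int) - 1) 1 = [] from
        PySem.List.pyRange_one_eq_nil (by norm_num)]
      rfl
    | cons y t =>
      have hlen : (((x :: y :: t : List (List Int)).length : Int) - 1) = (t.length : Int) + 1 := by
        push_cast [List.length_cons]
        ring
      rw [hlen]
      rw [show PySem.List.pyRange 0 ((t.length : Int) + 1) 1 =
          0 :: PySem.List.pyRange 1 ((t.length : Int) + 1) 1 from
        PySem.List.pyRange_one_cons (by positivity)]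
      simp only [List.foldl_cons]
      have hstep : pvStep (x :: y :: t) (x :: y :: t) 0 = x :: pvMid x y :: y :: t := by
        rw [pvStep_eq]
        rw [show (0 : Int) + 1 = 1 from rfl]
        rw [pyGetD_cons_pos x (y :: t) 1 le_rfl []]
        simp only [PySem.List.pyGetD_zero_cons, show (1 : Int) - 1 = 0 from rfl]
        rw [show (2 * (0 : Int) + 1) = ((1 : Nat) : Int) from by norm_num]
        rw [PySem.List.insert_natCast _ 1 _ (by simp)]
        rfl
      rw [hstep]
      rw [fold_shift x (pvMid x y) (y :: t) t.length 1 ((t.length : Int) + 1) le_rfl (by omega)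
            (y :: t)]
      have hlen2 : (((y :: t : List (List Int)).length : Int) - 1) = ((t.length : Int) + 1 - 1) := by
        simp
      rw [show (1 : Int) - 1 = 0 from rfl] at *
      rw [← hlen2] at *
      rw [ih]
      rfl

-- the port of A computes four interleaving sweeps
lemma get_more_eq (cur : List (List Int)) : get_more cur = pvIter 4 cur := by
  show (let st := (PySem.List.pyRange 0 4 1).foldl _ (cur, cur); st.2) = _
  rw [show PySem.List.pyRange 0 4 1 = [0, 1, 2, 3] from by decide]
  simp only [List.foldl_cons, List.foldl_nil]
  have key : ∀ r : List (List Int),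
      (PySem.List.pyRange 0 ((r.length : Int) - 1) 1).foldl
        (fun a j =>
          PySem.List.insert a (2 * j + 1)
            ((PySem.List.pyRange 0 2 1).foldl (fun num k =>
                PySem.List.pySetD num k
                  (PySem.Int.floordiv
                    (PySem.List.pyGetD (PySem.List.pyGetD r j []) k 0 +
                     PySem.List.pyGetD (PySem.List.pyGetD r (j + 1) []) k 0) 2)) [0, 0])) r
        = pvI r := fun r => inner_main r
  simp only [key]
  rfl

-- B-side: recursive subdivision of one pair equals iterated sweeps on the chain
lemma pvIter_split (n : Nat) :
    ∀ (p q : List Int) (t : List (List Int)),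
      pvIter n (p :: q :: t) = p :: (pvSubdivide p q n ++ pvIter n (q :: t)) := by
  induction n with
  | zero => intro p q t; simp [pvIter, pvSubdivide]
  | succ n ih =>
    intro p q t
    obtain ⟨r, hr⟩ := pvI_cons_exists q t
    show pvIter n (pvI (p :: q :: t)) = _
    rw [show pvI (p :: q :: t) = p :: pvMid p q :: pvI (q :: t) from rfl, hr]
    rw [ih p (pvMid p q) (q :: r), ih (pvMid p q) q r]
    have : pvIter n (q :: r) = pvIter (n + 1) (q :: t) := by
      rw [show pvIter (n + 1) (q :: t) = pvIter n (pvI (q :: t)) from rfl, hr]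
    rw [this]
    simp [pvSubdivide]

lemma pvIter_chain (rest : List (List Int)) :
    ∀ p : List Int,
      pvIter 4 (p :: rest) =
        p :: ((p :: rest).zip rest).flatMap (fun pq => pvSubdivide pq.1 pq.2 4 ++ [pq.2]) := by
  induction rest with
  | nil => intro p; simp [pvIter_singleton]
  | cons q t ih =>
    intro p
    rw [pvIter_split 4 p q t, ih q]
    simp

lemma foldl_append_flatMap :
    ∀ (l : List (List Int × List Int)) (acc : List (List Int)),
      l.foldl (fun out pq => out ++ pvSubdivide pq.1 pq.2 4 ++ [pq.2]) acc =
        acc ++ l.flatMap (fun pq => pvSubdivide pq.1 pq.2 4 ++ [pq.2]) := by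
  intro l
  induction l with
  | nil => intro acc; simp
  | cons pq t ih =>
    intro acc
    simp only [List.foldl_cons, List.flatMap_cons, ih]
    simp [List.append_assoc]

lemma alt_eq (cur : List (List Int)) : get_more_alt cur = pvIter 4 cur := by
  cases cur with
  | nil => rw [pvIter_nil]; rfl
  | cons c0 rest =>
    show ((c0 :: rest).zip (c0 :: rest).tail).foldl
        (fun out pq => out ++ pvSubdivide pq.1 pq.2 4 ++ [pq.2]) [c0] = _
    rw [foldl_append_flatMap]
    rw [pvIter_chain rest c0]
    rfl

-- ===== VERDICT (by name: the statement is the Claim_ definition above) =====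
theorem get_more_spec : Claim_equal_get_more := by
  intro cur _ _
  unfold Spec_get_more
  rw [get_more_eq, alt_eq]
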